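-- pv_equiv track=rewrite | github.com/fredjeong/programmers | 프로그래머스/2/12902. 3 x n 타일링/3 x n 타일링.py | solution
-- ===== SOURCE A (Python) =====
-- def solution(n):
--     dp = [0 for i in range(n+1)]
--
--     if n >= 2:
--         dp[2] = 3
--         dp[4] = 11
--         for i in range(6, n+1, 2):
--             dp[i] = dp[i-2] * 3 + 2
--             for j in range(i-4, -1, -2):
--                 dp[i] += dp[j] * 2
--             dp[i] = dp[i] % 1000000007
--
--     return dp[n]
-- ===== SOURCE B (Python) =====
-- def solution(n):
--     if n < 2 or n % 2:
--         return 0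
--     a, b = 1, 3
--     for _ in range(2, n, 2):
--         a, b = b, (4 * b - a) % 1000000007
--     return b
-- ===== Notes on version B (the rewrite author's own statement) =====
-- stated objective: faster
-- what changed: Replaced the quadratic DP with an inner scan over all previous even entries (dp[i]=3*dp[i-2]+2+2*sum(dp[j])) by the equivalent two-term linear recurrence f(i)=(4*f(i-2)-f(i-4)) mod 1e9+7 kept in two rolling variables, a single O(n) pass with O(1) memory.
-- outside the precondition, e.g. on solution(2): A raises IndexError, B returns 3; on solution(3): A raises IndexError, B returns 0; on solution(-1): A raises IndexError, B returns 0
import Mathlib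
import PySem

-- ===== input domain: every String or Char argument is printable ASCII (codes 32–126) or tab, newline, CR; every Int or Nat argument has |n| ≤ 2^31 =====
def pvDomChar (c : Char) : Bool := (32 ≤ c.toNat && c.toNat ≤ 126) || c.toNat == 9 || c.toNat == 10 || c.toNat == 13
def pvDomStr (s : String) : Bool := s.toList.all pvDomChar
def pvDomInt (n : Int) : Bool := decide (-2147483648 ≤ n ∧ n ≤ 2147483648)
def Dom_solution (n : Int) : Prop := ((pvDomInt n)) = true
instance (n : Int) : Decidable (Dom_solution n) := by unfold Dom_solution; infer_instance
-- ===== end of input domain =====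

-- B replaces A's quadratic DP (inner scan over all previous even entries) by the two-term
-- linear recurrence f(i) = (4*f(i-2) - f(i-4)) mod 1e9+7 in two rolling variables: O(n) vs O(n^2).

-- ===== PORT A =====
-- inner loop 'for j in range(i-4, -1, -2): dp[i] += dp[j] * 2' accumulated in v (dp[i] is only read at j ≤ i-4, so the running value is the same)
def aInner (dp : List Int) (i : Int) : Int :=
  (PySem.List.pyRange (i-4) (-1) (-2)).foldl (fun v j => v + dp.getD j.toNat 0 * 2)
    (dp.getD (i-2).toNat 0 * 3 + 2)

-- one outer iteration: dp[i] = (…) % 1000000007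
def aStep (dp : List Int) (i : Int) : List Int :=
  dp.set i.toNat (PySem.Int.mod (aInner dp i) 1000000007)

def solution (n : Int) : Int :=
  let dp : List Int := (List.range (n+1).toNat).map (fun _ => 0)   -- [0 for i in range(n+1)]
  let dp : List Int :=
    if n ≥ 2 then
      -- dp[2] = 3; dp[4] = 11  (for n ∈ {2,3} Python raises IndexError at dp[4]; those n are outside Pre_)
      (PySem.List.pyRange 6 (n+1) 2).foldl aStep ((dp.set 2 3).set 4 11)
    else dp
  dp.getD n.toNat 0   -- dp[n]; IndexError for n < 0 is outside Pre_

-- ===== PORT B =====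
def solution_alt (n : Int) : Int :=
  if n < 2 ∨ PySem.Int.mod n 2 ≠ 0 then 0
  else
    let ab := (PySem.List.pyRange 2 n 2).foldl
      (fun (ab : Int × Int) _ => (ab.2, PySem.Int.mod (4 * ab.2 - ab.1) 1000000007)) (1, 3)
    ab.2

-- ===== PRECONDITION & SPEC =====
-- Pre_ excludes exactly the inputs where A raises IndexError: n < 0 (dp[n]) and n ∈ {2,3} (dp[4] = 11).
def Pre_solution (n : Int) : Prop := n = 0 ∨ n = 1 ∨ 4 ≤ n
instance (n : Int) : Decidable (Pre_solution n) := by unfold Pre_solution; infer_instance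
def pvWitness_solution : Int := 6

def Spec_solution (n : Int) (out : Int) : Prop := out = solution_alt n
instance (n : Int) (out : Int) : Decidable (Spec_solution n out) := by unfold Spec_solution; infer_instance

-- ===== CLAIM (what is proved, stated in full; the proofs are below) =====
def Claim_equal_solution : Prop := ∀ (n : Int), Dom_solution n → Pre_solution n → Spec_solution n (solution n)

-- ===== LEMMAS AND PROOFS =====

def hB : Nat → Int
  | 0 => 1
  | 1 => 3
  | (k+2) => PySem.Int.mod (4 * hB (k+1) - hB k) 1000000007
def Hs : Nat → Int
  | 0 => 0
  | (m+1) => Hs m + hB (m+1)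
def w : Nat → Int := fun s => if s = 0 then 0 else hB s

lemma pyRange_up (n : Int) (h : 4 ≤ n) : PySem.List.pyRange 6 (n+1) 2
    = List.map (fun k : Nat => (6:Int) + 2*(k:Int)) (List.range ((n-4)/2).toNat) := by
  rw [PySem.List.pyRange_of_pos 6 (n+1) (by norm_num)]
  have hc : (if (6:Int) < n + 1 then ((n + 1 - 6 + 2 - 1) / 2).toNat else 0) = ((n-4)/2).toNat := by
    split_ifs <;> omega
  rw [hc]

lemma sum_desc (m : Nat) : ∀ v0 : Int,
    (List.range (m+1)).foldl (fun v k => v + w (m - k) * 2) v0 = v0 + 2 * Hs m := by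
  induction m with
  | zero => intro v0; simp [w, Hs]
  | succ m ih =>
      intro v0
      rw [List.range_succ_eq_map, List.foldl_cons, List.foldl_map]
      simp only [Nat.succ_sub_succ, Nat.sub_zero]
      rw [ih]
      show v0 + w (m+1) * 2 + 2 * Hs m = v0 + 2 * (Hs m + hB (m+1))
      rw [show w (m+1) = hB (m+1) from by simp [w]]
      ring

def val (m j : Nat) : Int := if j % 2 = 1 ∨ j = 0 ∨ m < j then 0 else hB (j/2)

lemma val_even (t s : Nat) (hs : s ≤ t+2) : val (4+2*t) (2*s) = w s := by
  unfold val w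
  rcases Nat.eq_zero_or_pos s with h0 | h1
  · simp [h0]
  · rw [if_neg (by omega), if_neg (by omega)]
    congr 1
    omega

lemma pyRange_down (t : Nat) : PySem.List.pyRange (2+2*(t:Int)) (-1) (-2)
    = List.map (fun k : Nat => (2+2*(t:Int)) - 2*(k:Int)) (List.range (t+2)) := by
  simp only [PySem.List.pyRange]
  norm_num
  have hc : ((2 + 2 * (t:Int) + 1 + 2 - 1) / 2) = (t:Int) + 2 := by omega
  rw [if_pos (by omega), hc]
  rw [show ((t:Int)+2).toNat = t + 2 from by omega]
  simp [sub_eq_add_neg]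

lemma aInner_eval (t : Nat) (dp : List Int)
    (hdp : ∀ j : Nat, dp.getD j 0 = val (4+2*t) j) :
    aInner dp (6+2*(t:Int)) = hB (t+2) * 3 + 2 + 2 * Hs (t+1) := by
  unfold aInner
  rw [show (6+2*(t:Int)) - 4 = 2+2*(t:Int) from by ring, pyRange_down, List.foldl_map]
  rw [show ((6+2*(t:Int)) - 2).toNat = 2*(t+2) from by omega]
  rw [hdp (2*(t+2)), val_even t (t+2) le_rfl, show w (t+2) = hB (t+2) from by simp [w]]
  have hfun : (fun (v : Int) (k : Nat) => v + dp.getD ((2+2*(t:Int)) - 2*(k:Int)).toNat 0 * 2)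
      = (fun (v : Int) (k : Nat) => v + w (t+1-k) * 2) := by
    funext v k
    rw [show ((2+2*(t:Int)) - 2*(k:Int)).toNat = 2*((t+1) - k) from by omega]
    rw [hdp (2*((t+1)-k)), val_even t ((t+1)-k) (by omega)]
  rw [hfun]
  exact sum_desc (t+1) _

lemma hB_two : hB 2 = 11 := by decide

lemma getD_set (l : List Int) (i j : Nat) (v : Int) :
    (l.set i v).getD j 0 = if i = j ∧ i < l.length then v else l.getD j 0 := by
  simp only [List.getD_eq_getElem?_getD, List.getElem?_set]
  split_ifs with h1 h2 h3 h4 <;> simp_all <;> omega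

lemma getD_const (N j : Nat) : ((List.range N).map (fun _ => (0:Int))).getD j 0 = 0 := by
  simp [List.getD_eq_getElem?_getD]

def dpA (N t : Nat) : List Int :=
  (List.map (fun k : Nat => (6:Int) + 2*(k:Int)) (List.range t)).foldl aStep
    (((List.range (N+1)).map (fun _ => (0:Int))).set 2 3 |>.set 4 11)


lemma hB_succ_emod (k : Nat) : hB (k+2) = (4 * hB (k+1) - hB k) % 1000000007 := by
  show PySem.Int.mod _ _ = _
  rw [PySem.Int.mod_eq_emod_of_pos (by norm_num)]

-- key congruence: 2 + 2*(hB 1 + … + hB (t+1)) ≡ hB (t+2) − hB (t+1)  (mod 1e9+7)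
lemma cong_sum (t : Nat) : (2 + 2 * Hs (t+1)) % 1000000007 = (hB (t+2) - hB (t+1)) % 1000000007 := by
  induction t with
  | zero => decide
  | succ t ih =>
      have h3 : hB (t+3) % 1000000007 = (4 * hB (t+2) - hB (t+1)) % 1000000007 := by
        rw [hB_succ_emod (t+1)]; exact Int.emod_emod_of_dvd _ dvd_rfl
      have e1 : (2 + 2 * Hs (t+2)) = (2 + 2 * Hs (t+1)) + 2 * hB (t+2) := by
        show 2 + 2 * (Hs (t+1) + hB (t+2)) = _
        ring
      have mc : Int.ModEq 1000000007 (2 + 2 * Hs (t+2)) (hB (t+3) - hB (t+2)) := by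
        rw [e1]
        calc (2 + 2 * Hs (t+1)) + 2 * hB (t+2)
            ≡ (hB (t+2) - hB (t+1)) + 2 * hB (t+2) [ZMOD 1000000007] := Int.ModEq.add_right _ ih
          _ = (4 * hB (t+2) - hB (t+1)) - hB (t+2) := by ring
          _ ≡ hB (t+3) - hB (t+2) [ZMOD 1000000007] := Int.ModEq.sub_right _ h3.symm
      exact mc

-- the value written by one outer iteration equals the next hB
lemma key_step (t : Nat) : (3 * hB (t+2) + 2 + 2 * Hs (t+1)) % 1000000007 = hB (t+3) := by
  have h : Int.ModEq 1000000007 (3 * hB (t+2) + 2 + 2 * Hs (t+1)) (4 * hB (t+2) - hB (t+1)) := by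
    calc 3 * hB (t+2) + 2 + 2 * Hs (t+1)
        = 3 * hB (t+2) + (2 + 2 * Hs (t+1)) := by ring
      _ ≡ 3 * hB (t+2) + (hB (t+2) - hB (t+1)) [ZMOD 1000000007] := Int.ModEq.add_left _ (cong_sum t)
      _ = 4 * hB (t+2) - hB (t+1) := by ring
  rw [hB_succ_emod (t+1)]
  exact h

-- B's rolling pair after processing a list: only its length matters
lemma foldB (l : List Int) : ∀ k : Nat,
    l.foldl (fun (ab : Int × Int) _ => (ab.2, PySem.Int.mod (4 * ab.2 - ab.1) 1000000007)) (hB k, hB (k+1))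
      = (hB (k + l.length), hB (k + l.length + 1)) := by
  induction l with
  | nil => intro k; simp
  | cons a l ih =>
      intro k
      rw [List.foldl_cons]
      rw [show ((hB k, hB (k+1)).2, PySem.Int.mod (4 * (hB k, hB (k+1)).2 - (hB k, hB (k+1)).1) 1000000007)
            = (hB (k+1), hB (k+2)) from rfl]
      rw [ih (k+1)]
      rw [List.length_cons]
      have e1 : k + 1 + l.length = k + (l.length + 1) := by omega
      rw [e1]

lemma foldA (N : Nat) (hN : 4 ≤ N) : ∀ t : Nat, 4 + 2*t ≤ N →
    (dpA N t).length = N+1 ∧ ∀ j : Nat, (dpA N t).getD j 0 = val (4+2*t) j := by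
  intro t
  induction t with
  | zero =>
      intro _
      refine ⟨by simp [dpA], fun j => ?_⟩
      unfold dpA
      simp only [List.range_zero, List.map_nil, List.foldl_nil]
      rw [getD_set, getD_set, getD_const]
      simp only [List.length_set, List.length_map, List.length_range]
      by_cases h4 : j = 4
      · rw [if_pos ⟨h4.symm, by omega⟩]
        subst h4
        unfold val
        norm_num [hB_two]
      · rw [if_neg (by intro hc; exact h4 hc.1.symm)]
        by_cases h2 : j = 2
        · rw [if_pos ⟨h2.symm, by omega⟩]
          subst h2
          unfold val
          decide
        · rw [if_neg (by intro hc; exact h2 hc.1.symm)]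
          unfold val
          rw [if_pos (by omega)]
  | succ t ih =>
      intro ht
      have ih' := ih (by omega)
      have hstep : dpA N (t+1) = aStep (dpA N t) (6+2*(t:Int)) := by
        unfold dpA
        rw [show List.map (fun k : Nat => (6:Int) + 2*(k:Int)) (List.range (t+1))
              = List.map (fun k : Nat => (6:Int) + 2*(k:Int)) (List.range t) ++ [(6:Int) + 2*(t:Int)] from by
            rw [List.range_succ, List.map_append]; rfl]
        rw [List.foldl_append]
        rfl
      have hlen : (dpA N t).length = N+1 := ih'.1
      have hval := ih'.2
      refine ⟨by rw [hstep]; unfold aStep; rw [List.length_set]; exact hlen, fun j => ?_⟩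
      rw [hstep]
      unfold aStep
      rw [show ((6:Int)+2*(t:Int)).toNat = 6+2*t from by omega, getD_set, hlen]
      rw [show PySem.Int.mod (aInner (dpA N t) (6+2*(t:Int))) 1000000007 = hB (t+3) from by
        rw [aInner_eval t _ hval, PySem.Int.mod_eq_emod_of_pos (by norm_num),
            show hB (t+2) * 3 + 2 + 2 * Hs (t+1) = 3 * hB (t+2) + 2 + 2 * Hs (t+1) from by ring]
        exact key_step t]
      by_cases hj : 6+2*t = j
      · rw [if_pos ⟨hj, by omega⟩]
        unfold val
        rw [if_neg (by omega)]
        congr 1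
        omega
      · rw [if_neg (by intro hc; exact hj hc.1)]
        rw [hval j]
        unfold val
        by_cases hcond : j % 2 = 1 ∨ j = 0 ∨ 4+2*t < j
        · rw [if_pos hcond, if_pos (by omega)]
        · rw [if_neg hcond, if_neg (by omega)]

-- ===== VERDICT (by name: the statement is the Claim_ definition above) =====
theorem solution_spec : Claim_equal_solution := by
  unfold Claim_equal_solution Spec_solution
  intro n _ hpre
  unfold Pre_solution at hpre
  rcases hpre with h0 | h1 | h4
  · subst h0; decide
  · subst h1; decide
  obtain ⟨N, hn⟩ : ∃ N : Nat, n = (N:Int) := ⟨n.toNat, by omega⟩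
  subst hn
  have hN : 4 ≤ N := by exact_mod_cast h4
  -- A's side reduces to the dpA fold
  have hA : solution (N:Int) = (dpA N ((((N:Int))-4)/2).toNat).getD N 0 := by
    rw [show solution (N:Int)
          = (if (N:Int) ≥ 2 then
               List.foldl aStep (((List.map (fun _ => (0:Int)) (List.range ((N:Int)+1).toNat)).set 2 3).set 4 11)
                 (PySem.List.pyRange 6 ((N:Int)+1) 2)
             else List.map (fun _ => (0:Int)) (List.range ((N:Int)+1).toNat)).getD ((N:Int)).toNat 0 from rfl]
    unfold dpA
    rw [if_pos (show ((N:Int)) ≥ 2 by omega)]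
    rw [pyRange_up (N:Int) h4]
    rw [show (((N:Int))+1).toNat = N+1 from by omega]
    rw [show ((N:Int)).toNat = N from by omega]
  set T : Nat := ((((N:Int))-4)/2).toNat with hT
  have hTle : 4 + 2*T ≤ N := by omega
  have hfold := (foldA N hN T hTle).2 N
  rw [hA, hfold]
  by_cases hpar : N % 2 = 1
  · -- odd n: A leaves dp[n] = 0, B returns 0
    rw [show val (4+2*T) N = 0 from by unfold val; rw [if_pos (Or.inl hpar)]]
    unfold solution_alt
    rw [if_pos (Or.inr (by rw [PySem.Int.mod_eq_emod_of_pos (by norm_num)]; omega))]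
  · -- even n ≥ 4
    have hTN : 4 + 2*T = N := by omega
    rw [show val (4+2*T) N = hB (N/2) from by unfold val; rw [if_neg (by omega)]]
    unfold solution_alt
    rw [if_neg (by
      rintro (hlt | hm)
      · omega
      · exact hm (by rw [PySem.Int.mod_eq_emod_of_pos (by norm_num)]; omega))]
    have hlen : (PySem.List.pyRange 2 (N:Int) 2).length = N/2 - 1 := by
      rw [PySem.List.pyRange_of_pos 2 (N:Int) (by norm_num)]
      rw [List.length_map, List.length_range]
      rw [if_pos (by exact_mod_cast by omega : (2:Int) < (N:Int))]
      omega
    have hfb := foldB (PySem.List.pyRange 2 (N:Int) 2) 0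
    rw [show ((1:Int), (3:Int)) = (hB 0, hB 1) from rfl]
    rw [hfb, hlen]
    show hB (N/2) = hB (0 + (N/2 - 1) + 1)
    congr 1
    omega
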